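-- pv_equiv track=rewrite | github.com/Narcolepsyy/d2l-jp | .github/workflow_scripts/generate_eval_cache.py | _fix_malformed_opening
-- ===== SOURCE A (Python) =====
-- def _fix_malformed_opening(content):
--     """Fix files that start with bare {.python .input} without leading ```.
--
--     Some d2l files start with:
--         {.python .input}
--         %load_ext d2lbook.tab
--         tab.interact_select([...])
--         ```
--
--     This is a d2lbook setup block that should be completely removed.
--     """
--     lines = content.split('\n')
--     if lines and lines[0].strip() in ('{.python .input}',
--                                        '{.python .input  n=1}',
--                                        '{.python .input  n=2}'):
--         # Find the closing ``` and skip everything up to and including it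
--         for j in range(1, len(lines)):
--             if lines[j].startswith('```'):
--                 content = '\n'.join(lines[j + 1:])
--                 break
--     return content
-- ===== SOURCE B (Python) =====
-- def _fix_malformed_opening(content):
--     """Fix files that start with bare {.python .input} without leading ```.
--
--     Offset-based: works on the raw string with find() and one slice,
--     instead of materialising a list of lines and re-joining.
--     """
--     nl = content.find('\n')
--     first = content if nl == -1 else content[:nl]
--     if first.strip() not in ('{.python .input}',
--                              '{.python .input  n=1}',
--                              '{.python .input  n=2}'):
--         return content
--     idx = content.find('\n```')
--     if idx == -1:
--         return content
--     end = content.find('\n', idx + 1)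
--     return '' if end == -1 else content[end + 1:]
-- ===== Notes on version B (the rewrite author's own statement) =====
-- stated objective: simpler
-- what changed: B drops A's split-into-lines / indexed scan / join pipeline and works on the raw string with integer offsets: one find isolates the first line, another locates the newline-plus-fence marker, and a single slice past the following newline yields the result, so no line list is ever materialised.
import Mathlib
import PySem

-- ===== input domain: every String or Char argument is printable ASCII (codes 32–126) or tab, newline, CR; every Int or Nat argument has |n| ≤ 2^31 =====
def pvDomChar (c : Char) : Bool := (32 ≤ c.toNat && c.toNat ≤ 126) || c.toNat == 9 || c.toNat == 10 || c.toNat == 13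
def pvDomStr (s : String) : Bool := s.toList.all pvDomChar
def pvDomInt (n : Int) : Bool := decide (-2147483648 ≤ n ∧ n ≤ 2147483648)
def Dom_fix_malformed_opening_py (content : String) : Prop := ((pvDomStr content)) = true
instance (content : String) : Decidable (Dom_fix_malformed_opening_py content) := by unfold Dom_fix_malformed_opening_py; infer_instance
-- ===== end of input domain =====

-- B removes the d2lbook setup block by offset arithmetic on the raw string (find + one slice)
-- instead of A's split-into-lines / scan / join pipeline; objective: simpler (no line list).

-- ===== PORT A =====
-- A's "for j in range(1, len(lines)): if lines[j].startswith('```'): … break" loop over the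
-- lines after the first: returns lines[j+1:] at the first fence line, none if no fence
def pvFenceA : List String → Option (List String)
  | [] => none
  | l :: rest => if PySem.Str.startswith l "```" then some rest else pvFenceA rest

def fix_malformed_opening_py (content : String) : String :=
  let lines := (PySem.Str.split? content "\n").getD []
  match lines with
  | [] => content
  | l0 :: rest =>
    if PySem.Str.strip l0 == "{.python .input}"
        || PySem.Str.strip l0 == "{.python .input  n=1}"
        || PySem.Str.strip l0 == "{.python .input  n=2}" then
      match pvFenceA rest with
      | some tail => PySem.Str.join "\n" tail
      | none => content
    else content

-- ===== PORT B =====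
def fix_malformed_opening_py_alt (content : String) : String :=
  let nl := PySem.Str.find content "\n"
  let first := if nl == -1 then content else PySem.Str.slice content none (some nl)
  if PySem.Str.strip first == "{.python .input}"
      || PySem.Str.strip first == "{.python .input  n=1}"
      || PySem.Str.strip first == "{.python .input  n=2}" then
    let idx := PySem.Str.find content "\n```"
    if idx == -1 then content
    else
      let e := PySem.Str.findFrom content "\n" (idx + 1)
      if e == -1 then "" else PySem.Str.slice content (some (e + 1)) none
  else content

-- ===== PRECONDITION & SPEC =====
def Spec_fix_malformed_opening_py (content : String) (out : String) : Prop := out = fix_malformed_opening_py_alt content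
instance (content : String) (out : String) : Decidable (Spec_fix_malformed_opening_py content out) := by unfold Spec_fix_malformed_opening_py; infer_instance

-- ===== CLAIM (what is proved, stated in full; the proofs are below) =====
def Claim_equal_fix_malformed_opening_py : Prop := ∀ (content : String), Dom_fix_malformed_opening_py content → Spec_fix_malformed_opening_py content (fix_malformed_opening_py content)

-- ===== LEMMAS AND PROOFS =====

def pvLines : List Char → List (List Char)
  | [] => [[]]
  | c :: rest =>
    if c = '\n' then [] :: pvLines rest
    else
      match pvLines rest with
      | [] => [[c]]
      | x :: xs => (c :: x) :: xs

theorem pvLines_ne_nil (cs : List Char) : pvLines cs ≠ [] := by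
  induction cs with
  | nil => simp [pvLines]
  | cons c rest ih =>
    simp only [pvLines]
    split
    · simp
    · split <;> simp

def pvConsHead (p : List Char) : List (List Char) → List (List Char)
  | [] => [p]
  | x :: xs => (p ++ x) :: xs

theorem pvGoSpec : ∀ (fuel : ℕ) (l cur : List Char) (acc : List (List Char)),
    l.length < fuel →
    PySem.Chars.splitOn.go ['\n'] fuel l cur acc =
      acc.reverse ++ pvConsHead cur.reverse (pvLines l) := by
  intro fuel
  induction fuel with
  | zero => intro l cur acc h; omega
  | succ n ih =>
    intro l cur acc h
    cases l with
    | nil => simp [PySem.Chars.splitOn.go, pvLines, pvConsHead]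
    | cons c rest =>
      by_cases hc : c = '\n'
      · subst hc
        rw [PySem.Chars.splitOn.go]
        have hpre : List.isPrefixOf ['\n'] ('\n' :: rest) = true := by simp [List.isPrefixOf]
        simp only [hpre, if_true]
        show PySem.Chars.splitOn.go ['\n'] n rest [] (cur.reverse :: acc) = _
        rw [ih rest [] (cur.reverse :: acc) (by simpa using Nat.lt_of_succ_lt_succ h)]
        obtain ⟨x, xs, hx⟩ : ∃ x xs, pvLines rest = x :: xs := by
          cases hr : pvLines rest with
          | nil => exact absurd hr (pvLines_ne_nil rest)
          | cons x xs => exact ⟨x, xs, rfl⟩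
        simp [pvLines, hx, pvConsHead]
      · rw [PySem.Chars.splitOn.go]
        have hpre : List.isPrefixOf ['\n'] (c :: rest) = false := by
          simp [List.isPrefixOf]
          intro h'; exact hc h'.symm
        simp only [hpre, Bool.false_eq_true, if_false]
        rw [ih rest (c :: cur) acc (by simpa using Nat.lt_of_succ_lt_succ h)]
        obtain ⟨x, xs, hx⟩ : ∃ x xs, pvLines rest = x :: xs := by
          cases hr : pvLines rest with
          | nil => exact absurd hr (pvLines_ne_nil rest)
          | cons x xs => exact ⟨x, xs, rfl⟩
        simp [pvLines, hx, pvConsHead, hc]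

theorem pvSplitOn_eq_pvLines (cs : List Char) :
    PySem.Chars.splitOn cs ['\n'] = pvLines cs := by
  rw [PySem.Chars.splitOn, pvGoSpec (cs.length + 1) cs [] [] (by omega)]
  obtain ⟨x, xs, hx⟩ : ∃ x xs, pvLines cs = x :: xs := by
    cases hr : pvLines cs with
    | nil => exact absurd hr (pvLines_ne_nil cs)
    | cons x xs => exact ⟨x, xs, rfl⟩
  simp [hx, pvConsHead]

theorem pvLines_no_nl {cs : List Char} (h : '\n' ∉ cs) : pvLines cs = [cs] := by
  induction cs with
  | nil => simp [pvLines]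
  | cons c rest ih =>
    simp only [List.mem_cons, not_or] at h
    simp [pvLines, Ne.symm h.1, ih h.2]

theorem pvLines_append {a : List Char} (b : List Char) (h : '\n' ∉ a) :
    pvLines (a ++ '\n' :: b) = a :: pvLines b := by
  induction a with
  | nil => simp [pvLines]
  | cons c a' ih =>
    simp only [List.mem_cons, not_or] at h
    simp [pvLines, Ne.symm h.1, ih h.2]

theorem pvJoinCons (x : List Char) (xs : List (List Char)) (c : Char) :
    PySem.Chars.join ['\n'] ((c :: x) :: xs) = c :: PySem.Chars.join ['\n'] (x :: xs) := by
  cases xs with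
  | nil => simp [PySem.Chars.join_singleton]
  | cons y ys => simp [PySem.Chars.join_cons_cons]

theorem pvJoin_pvLines (cs : List Char) :
    PySem.Chars.join ['\n'] (pvLines cs) = cs := by
  induction cs with
  | nil => simp [pvLines, PySem.Chars.join_singleton]
  | cons c rest ih =>
    obtain ⟨x, xs, hx⟩ : ∃ x xs, pvLines rest = x :: xs := by
      cases hr : pvLines rest with
      | nil => exact absurd hr (pvLines_ne_nil rest)
      | cons x xs => exact ⟨x, xs, rfl⟩
    by_cases hc : c = '\n'
    · subst hc
      simp only [pvLines, if_true]
      rw [show ([] : List Char) :: pvLines rest = ([] : List Char) :: pvLines rest from rfl, hx,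
        PySem.Chars.join_cons_cons]
      simpa [hx] using ih
    · simp only [pvLines, hc, if_false, hx]
      rw [pvJoinCons, ← hx]
      simpa using congrArg (c :: ·) ih

theorem pvDecomp {cs : List Char} (h : '\n' ∈ cs) :
    ∃ a b, '\n' ∉ a ∧ cs = a ++ '\n' :: b := by
  induction cs with
  | nil => simp at h
  | cons c rest ih =>
    by_cases hc : c = '\n'
    · exact ⟨[], rest, by simp, by simp [hc]⟩
    · have : '\n' ∈ rest := by
        rcases List.mem_cons.mp h with h' | h'
        · exact absurd h'.symm hc
        · exact h'
      obtain ⟨a, b, ha, hab⟩ := ih this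
      exact ⟨c :: a, b, by simp [ha, Ne.symm hc], by simp [hab]⟩

theorem pvPrefixHead {c : Char} {q s : List Char} {i : ℕ}
    (h : (c :: q) <+: s.drop i) : s[i]? = some c := by
  obtain ⟨t, ht⟩ := h
  have : (s.drop i)[0]? = some c := by rw [← ht]; simp
  rwa [List.getElem?_drop, Nat.add_zero] at this

theorem pvFindEq {s sub : List Char} (k : ℕ)
    (hp : sub <+: s.drop k) (hmin : ∀ i < k, ¬ sub <+: s.drop i) :
    PySem.Chars.find s sub = (k : ℤ) := by
  have hinf : sub <:+: s := hp.isInfix.trans (s.drop_suffix k).isInfix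
  have hne := (PySem.Chars.find_ne_neg_one_iff s sub).mpr hinf
  have h0 : 0 ≤ PySem.Chars.find s sub := by
    have := PySem.Chars.neg_one_le_find s sub
    omega
  obtain ⟨h1, h2⟩ := PySem.Chars.find_spec h0
  rcases Nat.lt_trichotomy (PySem.Chars.find s sub).toNat k with hlt | heq | hgt
  · exact absurd h1 (hmin _ hlt)
  · omega
  · exact absurd hp (h2 k hgt)

theorem pvFindNeg {s sub : List Char} (h : ∀ i, ¬ sub <+: s.drop i) :
    PySem.Chars.find s sub = -1 := by
  rw [PySem.Chars.find_eq_neg_one_iff]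
  intro hinf
  have : PySem.Chars.isIn sub s = true := (PySem.Chars.isIn_iff_infix sub s).mpr hinf
  obtain ⟨j, hj⟩ := (PySem.Chars.exists_prefix_drop_iff_isIn sub s).mpr this
  exact h j hj

theorem pvNoNlOcc {a : List Char} (t q : List Char) (ha : '\n' ∉ a) :
    ∀ i < a.length, ¬ ('\n' :: q) <+: (a ++ t).drop i := by
  intro i hi hcon
  have h1 := pvPrefixHead hcon
  rw [List.getElem?_append_left hi] at h1
  exact ha (List.mem_of_getElem? h1)

theorem pvFindCharAppend {a : List Char} (b : List Char) (ha : '\n' ∉ a) :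
    PySem.Chars.find (a ++ '\n' :: b) ['\n'] = (a.length : ℤ) := by
  apply pvFindEq
  · rw [List.drop_left]
    simp
  · exact pvNoNlOcc ('\n' :: b) [] ha

theorem pvFindNlNone {cs : List Char} (h : '\n' ∉ cs) :
    PySem.Chars.find cs ['\n'] = -1 := by
  apply pvFindNeg
  intro i hcon
  exact h (List.mem_of_getElem? (pvPrefixHead hcon))

theorem pvPrefixThroughAppend {p a b : List Char} (hp : '\n' ∉ p)
    (h : p <+: a ++ '\n' :: b) : p <+: a := by
  induction p generalizing a with
  | nil => exact List.nil_prefix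
  | cons c p' ih =>
    simp only [List.mem_cons, not_or] at hp
    cases a with
    | nil =>
      rw [List.nil_append, List.cons_prefix_cons] at h
      exact absurd h.1.symm hp.1
    | cons x a' =>
      rw [List.cons_append, List.cons_prefix_cons] at h
      exact List.cons_prefix_cons.mpr ⟨h.1, ih hp.2 h.2⟩

theorem pvShift {a t sub : List Char}
    (hno : ∀ i < a.length, ¬ sub <+: (a ++ t).drop i) :
    PySem.Chars.find (a ++ t) sub =
      if PySem.Chars.find t sub = -1 then -1 else (a.length : ℤ) + PySem.Chars.find t sub := by
  have hdrop : ∀ j : ℕ, (a ++ t).drop (a.length + j) = t.drop j := by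
    intro j
    rw [List.drop_append]
    simp
  by_cases hft : PySem.Chars.find t sub = -1
  · rw [if_pos hft]
    apply pvFindNeg
    intro i hcon
    by_cases hi : i < a.length
    · exact hno i hi hcon
    · have : (a ++ t).drop i = t.drop (i - a.length) := by
        have := hdrop (i - a.length)
        rwa [Nat.add_sub_cancel' (Nat.le_of_not_lt hi)] at this
      rw [this] at hcon
      have hisin : PySem.Chars.isIn sub t = true :=
        (PySem.Chars.exists_prefix_drop_iff_isIn sub t).mp ⟨_, hcon⟩
      have : sub <:+: t := (PySem.Chars.isIn_iff_infix sub t).mp hisin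
      exact (PySem.Chars.find_ne_neg_one_iff t sub).mpr this hft
  · rw [if_neg hft]
    have h0 : 0 ≤ PySem.Chars.find t sub := by
      have := PySem.Chars.neg_one_le_find t sub
      omega
    obtain ⟨h1, h2⟩ := PySem.Chars.find_spec h0
    have := pvFindEq (s := a ++ t) (sub := sub) (a.length + (PySem.Chars.find t sub).toNat)
      (by rw [hdrop]; exact h1)
      (by
        intro i hi hcon
        by_cases hia : i < a.length
        · exact hno i hia hcon
        · have hj : i - a.length < (PySem.Chars.find t sub).toNat := by omega
          have heq : (a ++ t).drop i = t.drop (i - a.length) := by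
            have := hdrop (i - a.length)
            rwa [Nat.add_sub_cancel' (Nat.le_of_not_lt hia)] at this
          rw [heq] at hcon
          exact h2 _ hj hcon)
    rw [this]
    push_cast
    rw [Int.toNat_of_nonneg h0]

def pvFenceC : List (List Char) → Option (List (List Char))
  | [] => none
  | l :: rest => if PySem.Chars.startswith l ['`', '`', '`'] then some rest else pvFenceC rest

theorem pvFenceC_map (ls : List String) :
    pvFenceC (ls.map String.toList) = Option.map (List.map String.toList) (pvFenceA ls) := by
  induction ls with
  | nil => simp [pvFenceA, pvFenceC]
  | cons l rest ih =>
    simp only [List.map_cons, pvFenceA, pvFenceC, PySem.Str.startswith_eq]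
    have hq : "```".toList = ['`', '`', '`'] := by decide
    simp only [hq]
    split
    · simp
    · exact ih

theorem pvDropApp (a t : List Char) (j : ℕ) : (a ++ t).drop (a.length + j) = t.drop j := by
  rw [List.drop_append]
  simp

theorem pvMainNoNl (rs : List Char) (hmem : '\n' ∉ rs) :
    match pvFenceC (pvLines rs) with
    | none => PySem.Chars.find ('\n' :: rs) ['\n', '`', '`', '`'] = -1
    | some tail => ∃ k : ℕ, PySem.Chars.find ('\n' :: rs) ['\n', '`', '`', '`'] = (k : ℤ) ∧
        k + 1 ≤ ('\n' :: rs).length ∧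
        ((PySem.Chars.find (('\n' :: rs).drop (k + 1)) ['\n'] = -1 ∧ tail = []) ∨
          (∃ m : ℕ, PySem.Chars.find (('\n' :: rs).drop (k + 1)) ['\n'] = (m : ℤ) ∧
            ('\n' :: rs).drop (k + 1 + m + 1) = PySem.Chars.join ['\n'] tail)) := by
  rw [pvLines_no_nl hmem]
  by_cases hs : PySem.Chars.startswith rs ['`', '`', '`'] = true
  · simp only [pvFenceC, hs, if_true]
    refine ⟨0, ?_, by simp, Or.inl ⟨by simpa using pvFindNlNone hmem, by trivial⟩⟩
    apply pvFindEq 0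
    · rw [List.drop_zero]
      exact List.cons_prefix_cons.mpr ⟨rfl, (PySem.Chars.startswith_iff rs _).mp hs⟩
    · omega
  · simp only [pvFenceC, hs]
    apply pvFindNeg
    intro i hcon
    cases i with
    | zero =>
      rw [List.drop_zero, List.cons_prefix_cons] at hcon
      exact hs ((PySem.Chars.startswith_iff rs _).mpr hcon.2)
    | succ j =>
      rw [List.drop_succ_cons] at hcon
      exact hmem (List.mem_of_getElem? (pvPrefixHead hcon))

theorem pvMain : ∀ (n : ℕ) (rs : List Char), rs.length ≤ n →
    match pvFenceC (pvLines rs) with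
    | none => PySem.Chars.find ('\n' :: rs) ['\n', '`', '`', '`'] = -1
    | some tail => ∃ k : ℕ, PySem.Chars.find ('\n' :: rs) ['\n', '`', '`', '`'] = (k : ℤ) ∧
        k + 1 ≤ ('\n' :: rs).length ∧
        ((PySem.Chars.find (('\n' :: rs).drop (k + 1)) ['\n'] = -1 ∧ tail = []) ∨
          (∃ m : ℕ, PySem.Chars.find (('\n' :: rs).drop (k + 1)) ['\n'] = (m : ℤ) ∧
            ('\n' :: rs).drop (k + 1 + m + 1) = PySem.Chars.join ['\n'] tail)) := by
  intro n
  induction n with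
  | zero =>
    intro rs h
    have : rs = [] := List.eq_nil_of_length_eq_zero (by omega)
    subst this
    exact pvMainNoNl [] (by simp)
  | succ n ih =>
    intro rs h
    by_cases hmem : '\n' ∈ rs
    case neg => exact pvMainNoNl rs hmem
    obtain ⟨f, rs', hf, hrs⟩ := pvDecomp hmem
    subst hrs
    rw [pvLines_append rs' hf]
    by_cases hsf : PySem.Chars.startswith f ['`', '`', '`'] = true
    · simp only [pvFenceC, hsf, if_true]
      refine ⟨0, ?_, by simp, Or.inr ⟨f.length, ?_, ?_⟩⟩
      · apply pvFindEq 0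
        · rw [List.drop_zero]
          refine List.cons_prefix_cons.mpr ⟨rfl, ?_⟩
          exact ((PySem.Chars.startswith_iff f _).mp hsf).trans (List.prefix_append f ('\n' :: rs'))
        · omega
      · rw [List.drop_succ_cons, List.drop_zero]
        exact pvFindCharAppend rs' hf
      · rw [show 0 + 1 + f.length + 1 = (f.length + 1) + 1 by omega, List.drop_succ_cons]
        have hh : (f ++ '\n' :: rs').drop (f.length + 1) = rs' := by
          simpa using pvDropApp f ('\n' :: rs') 1
        rw [hh, pvJoin_pvLines]
    · simp only [pvFenceC, hsf]
      have hnf : ¬ ['`', '`', '`'] <+: f := fun hc => hsf ((PySem.Chars.startswith_iff f _).mpr hc)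
      have hnrs : ¬ ['`', '`', '`'] <+: (f ++ '\n' :: rs') :=
        fun hc => hnf (pvPrefixThroughAppend (by decide) hc)
      have heqlist : '\n' :: (f ++ '\n' :: rs') = ('\n' :: f) ++ ('\n' :: rs') := by simp
      have hno : ∀ i < ('\n' :: f).length,
          ¬ ['\n', '`', '`', '`'] <+: (('\n' :: f) ++ ('\n' :: rs')).drop i := by
        intro i hi hcon
        cases i with
        | zero =>
          rw [List.drop_zero, ← heqlist, List.cons_prefix_cons] at hcon
          exact hnrs hcon.2
        | succ j =>
          have hj : j < f.length := by simpa using hi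
          rw [show (('\n' :: f) ++ ('\n' :: rs')) = '\n' :: (f ++ '\n' :: rs') by simp,
            List.drop_succ_cons] at hcon
          exact pvNoNlOcc ('\n' :: rs') ['`', '`', '`'] hf j hj hcon
      have hshift := pvShift (a := '\n' :: f) (t := '\n' :: rs') (sub := ['\n', '`', '`', '`']) hno
      rw [← heqlist] at hshift
      have hlen' : rs'.length ≤ n := by
        have : (f ++ '\n' :: rs').length ≤ n + 1 := h
        simp at this
        omega
      have IH := ih rs' hlen'
      cases hfc : pvFenceC (pvLines rs') with
      | none =>
        rw [hfc] at IH
        simp only [IH, if_pos] at hshift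
        exact hshift
      | some tail =>
        rw [hfc] at IH
        obtain ⟨k', hk', hklen, hbranch⟩ := IH
        have hne : PySem.Chars.find ('\n' :: rs') ['\n', '`', '`', '`'] ≠ -1 := by
          rw [hk']; omega
        rw [if_neg hne, hk'] at hshift
        refine ⟨('\n' :: f).length + k', by push_cast at hshift ⊢; omega, ?_, ?_⟩
        · simp only [List.length_cons] at hklen ⊢
          simp
          omega
        · have hd1 : ('\n' :: (f ++ '\n' :: rs')).drop (('\n' :: f).length + k' + 1) =
              ('\n' :: rs').drop (k' + 1) := by
            rw [heqlist, show ('\n' :: f).length + k' + 1 = ('\n' :: f).length + (k' + 1) by omega,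
              pvDropApp]
          rcases hbranch with ⟨hfind, htail⟩ | ⟨m, hm, hdrop⟩
          · exact Or.inl ⟨by rw [hd1]; exact hfind, htail⟩
          · refine Or.inr ⟨m, by rw [hd1]; exact hm, ?_⟩
            rw [heqlist, show ('\n' :: f).length + k' + 1 + m + 1 =
              ('\n' :: f).length + (k' + 1 + m + 1) by omega, pvDropApp]
            exact hdrop

theorem pvSplitSome (content : String) :
    ∃ LS : List String, PySem.Str.split? content "\n" = some LS ∧
      LS.map String.toList = pvLines content.toList := by
  have hbridge := PySem.Str.split?_map content "\n"
  have hnl : ("\n" : String).toList = ['\n'] := by decide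
  rw [hnl] at hbridge
  have hsp : PySem.Chars.split? content.toList ['\n'] = some (pvLines content.toList) := by
    rw [PySem.Chars.split?]
    simp [pvSplitOn_eq_pvLines]
  rw [hsp] at hbridge
  cases h : PySem.Str.split? content "\n" with
  | none => rw [h] at hbridge; simp at hbridge
  | some LS =>
    rw [h] at hbridge
    simp only [Option.map_some, Option.some.injEq] at hbridge
    exact ⟨LS, rfl, hbridge⟩

theorem pvPatNoNl {cs : List Char} (h : '\n' ∉ cs) :
    PySem.Chars.find cs ['\n', '`', '`', '`'] = -1 := by
  apply pvFindNeg
  intro i hcon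
  exact h (List.mem_of_getElem? (pvPrefixHead hcon))

theorem pvPortsEq (content : String) :
    fix_malformed_opening_py content = fix_malformed_opening_py_alt content := by
  obtain ⟨LS, hsp, hmapLS⟩ := pvSplitSome content
  have hpat : ("\n```" : String).toList = ['\n', '`', '`', '`'] := by decide
  have hnl : ("\n" : String).toList = ['\n'] := by decide
  by_cases hmem : '\n' ∈ content.toList
  · -- content has a newline
    obtain ⟨a, b, ha, hab⟩ := pvDecomp hmem
    have hlines : pvLines content.toList = a :: pvLines b := by rw [hab, pvLines_append b ha]
    rw [hlines] at hmapLS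
    obtain ⟨l0, REST, rfl⟩ : ∃ l0 REST, LS = l0 :: REST := by
      cases LS with
      | nil => simp at hmapLS
      | cons x xs => exact ⟨x, xs, rfl⟩
    simp only [List.map_cons, List.cons.injEq] at hmapLS
    obtain ⟨hl0, hREST⟩ := hmapLS
    -- B's first line computation
    have hfind_nl : PySem.Str.find content "\n" = (a.length : ℤ) := by
      rw [PySem.Str.find_eq, hnl, hab]
      exact pvFindCharAppend b ha
    have hbeq : ((a.length : ℤ) == -1) = false := by
      simp only [beq_eq_false_iff_ne, ne_eq]
      omega
    have hfirst : PySem.Str.slice content none (some ((a.length : ℤ))) = l0 := by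
      apply String.toList_inj.mp
      rw [PySem.Str.toList_slice, PySem.Chars.slice_eq_listSlice,
        PySem.List.slice_to_natCast, hab, List.take_left, hl0]
    -- unfold the two ports
    rw [fix_malformed_opening_py, fix_malformed_opening_py_alt]
    simp only [hsp, Option.getD_some, hfind_nl, hbeq, Bool.false_eq_true, if_false, hfirst]
    by_cases hcond : (PySem.Str.strip l0 == "{.python .input}"
        || PySem.Str.strip l0 == "{.python .input  n=1}"
        || PySem.Str.strip l0 == "{.python .input  n=2}") = true
    case neg =>
      simp only [Bool.not_eq_true] at hcond
      rw [hcond]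
      simp
    rw [hcond]
    simp only [if_true]
    -- the fence search
    have hshift := pvShift (a := a) (t := '\n' :: b) (sub := ['\n', '`', '`', '`'])
      (pvNoNlOcc ('\n' :: b) ['`', '`', '`'] ha)
    have hfenceC : pvFenceC (pvLines b) = Option.map (List.map String.toList) (pvFenceA REST) := by
      rw [← hREST, pvFenceC_map]
    have HM := pvMain b.length b le_rfl
    rw [hfenceC] at HM
    have hfind_pat : PySem.Str.find content "\n```" =
        PySem.Chars.find (a ++ '\n' :: b) ['\n', '`', '`', '`'] := by
      rw [PySem.Str.find_eq, hpat, hab]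
    cases hA : pvFenceA REST with
    | none =>
      rw [hA] at HM
      simp only [Option.map_none] at HM
      rw [hfind_pat, hshift, if_pos HM]
      simp
    | some tailS =>
      rw [hA] at HM
      simp only [Option.map_some] at HM
      obtain ⟨k, hk, hklen, hbr⟩ := HM
      have hkne : PySem.Chars.find ('\n' :: b) ['\n', '`', '`', '`'] ≠ -1 := by rw [hk]; omega
      rw [hfind_pat, hshift, if_neg hkne, hk]
      have hidx : ((a.length : ℤ) + (k : ℤ) == -1) = false := by
        simp only [beq_eq_false_iff_ne, ne_eq]
        omega
      rw [hidx]
      simp only [Bool.false_eq_true, if_false]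
      -- the next-newline search
      have hlen_cs : content.toList.length = a.length + (b.length + 1) := by
        rw [hab]; simp
      have hle : a.length + k + 1 ≤ content.toList.length := by
        simp only [List.length_cons] at hklen
        omega
      have hff : PySem.Str.findFrom content "\n" ((a.length : ℤ) + (k : ℤ) + 1) =
          if PySem.Chars.find (content.toList.drop (a.length + k + 1)) ['\n'] = -1 then -1
          else ((a.length + k + 1 : ℕ) : ℤ) + PySem.Chars.find (content.toList.drop (a.length + k + 1)) ['\n'] := by
        rw [PySem.Str.findFrom_eq, hnl,
          show (a.length : ℤ) + (k : ℤ) + 1 = ((a.length + k + 1 : ℕ) : ℤ) by push_cast; ring]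
        exact PySem.Chars.findFrom_natCast content.toList ['\n'] (a.length + k + 1) hle
      have hd1 : content.toList.drop (a.length + k + 1) = ('\n' :: b).drop (k + 1) := by
        rw [hab, show a.length + k + 1 = a.length + (k + 1) by omega, pvDropApp]
      rcases hbr with ⟨hfound, htail⟩ | ⟨m, hm, hdrop⟩
      · -- fence line is the last line: B returns "", A joins []
        have htailS : tailS = [] := List.map_eq_nil_iff.mp htail
        rw [hff, hd1, if_pos hfound]
        subst htailS
        have : PySem.Str.join "\n" [] = "" := by
          apply String.toList_inj.mp
          rw [PySem.Str.toList_join]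
          simp [PySem.Chars.join, List.intercalate]
        simp [this]
      · rw [hff, hd1, hm]
        have hmne : ((m : ℤ)) ≠ -1 := by omega
        rw [if_neg (by omega : ¬ ((m : ℤ)) = -1)]
        have hene : ((((a.length + k + 1 : ℕ) : ℤ)) + (m : ℤ) == -1) = false := by
          simp only [beq_eq_false_iff_ne, ne_eq]
          omega
        rw [hene]
        simp only [Bool.false_eq_true, if_false]
        apply String.toList_inj.mp
        rw [PySem.Str.toList_join, hnl, PySem.Str.toList_slice, PySem.Chars.slice_eq_listSlice,
          show (((a.length + k + 1 : ℕ) : ℤ)) + (m : ℤ) + 1 = (((a.length + k + 1 + m + 1 : ℕ)) : ℤ) by push_cast; ring,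
          PySem.List.slice_from_natCast, hab,
          show a.length + k + 1 + m + 1 = a.length + (k + 1 + m + 1) by omega, pvDropApp, hdrop]
  · -- no newline in content: A's loop scans nothing, B finds no "\n```"
    have hlines1 : pvLines content.toList = [content.toList] := pvLines_no_nl hmem
    rw [hlines1] at hmapLS
    obtain ⟨l0, rfl⟩ : ∃ l0, LS = [l0] := by
      cases LS with
      | nil => simp at hmapLS
      | cons x xs =>
        cases xs with
        | nil => exact ⟨x, rfl⟩
        | cons y ys => simp at hmapLS
    simp only [List.map_cons, List.map_nil, List.cons.injEq, and_true] at hmapLS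
    have hl0 : l0 = content := String.toList_inj.mp hmapLS
    subst hl0
    have hfind_nl : (PySem.Str.find l0 "\n" == -1) = true := by
      rw [PySem.Str.find_eq, hnl, pvFindNlNone hmem]
      decide
    rw [fix_malformed_opening_py, fix_malformed_opening_py_alt]
    simp only [hsp, Option.getD_some, hfind_nl, if_true]
    by_cases hcond : (PySem.Str.strip l0 == "{.python .input}"
        || PySem.Str.strip l0 == "{.python .input  n=1}"
        || PySem.Str.strip l0 == "{.python .input  n=2}") = true
    · rw [hcond]
      simp only [if_true]
      have : (PySem.Str.find l0 "\n```" == -1) = true := by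
        rw [PySem.Str.find_eq, hpat, pvPatNoNl hmem]
        decide
      rw [this]
      simp [pvFenceA]
    · simp only [Bool.not_eq_true] at hcond
      rw [hcond]
      simp

-- ===== VERDICT (by name: the statement is the Claim_ definition above) =====
theorem fix_malformed_opening_py_spec : Claim_equal_fix_malformed_opening_py := by
  intro content _hdom
  show fix_malformed_opening_py content = fix_malformed_opening_py_alt content
  exact pvPortsEq content
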